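-- pv_equiv track=rewrite | github.com/ling168x/python_100examples | no.4_example.py | gradeMeadl
-- ===== SOURCE A (Python) =====
-- def gradeMeadl(A):
-- 	grade = ['Gold Medal','Silver Medal','Bronze Medal']
-- 	if len(A)>3:
-- 		grade = grade + ["%d"%i for i in range(4,len(A)+1)]
-- 	B = A.copy()
-- 	C = A.copy()
-- 	B.sort()
-- 	for i in range(len(B)):
-- 		C[C.index(B[i])] = grade[i]
-- 	return C
-- ===== SOURCE B (Python) =====
-- def gradeMeadl(A):
--     n = len(A)
--     order = sorted(range(n), key=lambda i: A[i])
--     out = [None] * n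
--     for r, i in enumerate(order):
--         out[i] = ('Gold Medal', 'Silver Medal', 'Bronze Medal')[r] if r < 3 else "%d" % (r + 1)
--     return out
-- ===== Notes on version B (the rewrite author's own statement) =====
-- stated objective: faster
-- what changed: Replaced A's per-rank linear C.index scan over the partially overwritten list by a single stable argsort of the indices (sorted(range(n), key=A.__getitem__)) that writes each rank label directly into its position.
import Mathlib
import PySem

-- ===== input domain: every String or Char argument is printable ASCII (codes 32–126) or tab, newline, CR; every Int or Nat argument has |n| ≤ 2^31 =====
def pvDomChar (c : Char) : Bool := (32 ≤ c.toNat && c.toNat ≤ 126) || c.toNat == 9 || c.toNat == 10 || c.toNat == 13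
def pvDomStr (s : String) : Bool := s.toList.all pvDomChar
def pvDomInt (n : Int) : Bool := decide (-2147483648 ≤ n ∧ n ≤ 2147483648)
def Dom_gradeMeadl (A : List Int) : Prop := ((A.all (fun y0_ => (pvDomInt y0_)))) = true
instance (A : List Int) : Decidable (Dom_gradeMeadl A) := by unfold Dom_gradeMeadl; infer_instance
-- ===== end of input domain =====

-- B replaces A's quadratic loop of C.index scans by a stable argsort (sorted indices by value)
-- that assigns each rank label directly to its position: O(n log n) instead of O(n^2); return
-- values are proved identical on all inputs (neither program mutates its argument).

-- ===== PORT A =====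
-- A's list C starts as ints (a copy of A) and its cells are overwritten by grade strings;
-- Cell is that int-or-string cell type.
inductive Cell where
  | int : Int → Cell
  | str : String → Cell
deriving DecidableEq, Repr

-- loop body of 'for i in range(len(B)): C[C.index(B[i])] = grade[i]'.
-- B.getD i 0 and grade.getD i "" are B[i] / grade[i] (i is always in range: i < len(B) ≤ len(grade));
-- C.index raises ValueError only when the value is absent, which cannot happen here, so the
-- 'none' branch is unreachable; '==' between an int and a grade string is plain disequality,
-- which Cell's DecidableEq models exactly.
def aStep (grade : List String) (B : List Int) (C : List Cell) (i : Nat) : List Cell :=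
  match PySem.List.index? C (Cell.int (B.getD i 0)) with
  | some j => C.set j (Cell.str (grade.getD i ""))
  | none => C

def gradeAList (n : Nat) : List String :=
  let grade := ["Gold Medal", "Silver Medal", "Bronze Medal"]
  if (n : Int) > 3 then grade ++ (PySem.List.pyRange 4 ((n : Int) + 1) 1).map PySem.Int.toStr
  else grade

def gradeMeadl (A : List Int) : List String :=
  let grade := gradeAList A.length
  let B := PySem.List.sorted A (fun x => x) false
  let C := (List.range B.length).foldl (aStep grade B) (A.map Cell.int)
  -- 'return C': by then every cell holds a string (proved below); the Cell.int branch is unreachable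
  C.map (fun c => match c with | Cell.int z => PySem.Int.toStr z | Cell.str s => s)

-- ===== PORT B =====
-- ('Gold Medal','Silver Medal','Bronze Medal')[r] if r < 3 else "%d" % (r + 1)      (r < 3 keeps the tuple index in range)
def medalOrNum (r : Int) : String :=
  if r < 3 then ["Gold Medal", "Silver Medal", "Bronze Medal"].getD r.toNat ""
  else PySem.Int.toStr (r + 1)

-- loop body of 'for r, i in enumerate(order): out[i] = …'
def bStep (out : List (Option String)) (ri : Int × Nat) : List (Option String) :=
  out.set ri.2 (some (medalOrNum ri.1))

def gradeMeadl_alt (A : List Int) : List String :=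
  let n := A.length
  let order := PySem.List.sorted (List.range n) (fun i => A.getD i 0) false   -- sorted(range(n), key=lambda i: A[i])
  let out := (PySem.List.enumerate order).foldl bStep (List.replicate n none) -- out = [None]*n; for r, i in enumerate(order): out[i] = …
  out.map (fun o => o.getD "")   -- by then every slot is filled; the default "" is unreachable

-- ===== PRECONDITION & SPEC =====
def Spec_gradeMeadl (A : List Int) (out : List String) : Prop := out = gradeMeadl_alt A
instance (A : List Int) (out : List String) : Decidable (Spec_gradeMeadl A out) := by unfold Spec_gradeMeadl; infer_instance

-- ===== CLAIM (what is proved, stated in full; the proofs are below) =====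
def Claim_equal_gradeMeadl : Prop := ∀ (A : List Int), Dom_gradeMeadl A → Spec_gradeMeadl A (gradeMeadl A)

-- ===== LEMMAS AND PROOFS =====

-- the argsort permutation both programs are secretly computing
def sigma (A : List Int) : List Nat :=
  PySem.List.sorted (List.range A.length) (fun i => A.getD i 0) false

-- strict lexicographic order (value, then original position): the order of a STABLE argsort
def Rlex (key : Nat → Int) (a b : Nat) : Prop := key a < key b ∨ (key a = key b ∧ a < b)

lemma range_map_getD (A : List Int) :
    (List.range A.length).map (fun i => A.getD i 0) = A := by
  apply List.ext_getElem
  · simp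
  · intro i h1 h2
    simp [List.getD_eq_getElem?_getD, List.getElem?_eq_getElem h2]

lemma insertBy_pairwise (key : Nat → Int) (x : Nat) (acc : List Nat)
    (h1 : acc.Pairwise (Rlex key)) (h2 : ∀ y ∈ acc, y < x) :
    (PySem.List.insertBy (fun a b => decide (key a < key b)) x acc).Pairwise (Rlex key) := by
  induction acc with
  | nil => simp [PySem.List.insertBy]
  | cons y ys ih =>
    rw [List.pairwise_cons] at h1
    have hyx : y < x := h2 y (by simp)
    by_cases hb : key x < key y
    · simp only [PySem.List.insertBy, hb, decide_true, if_true]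
      refine List.pairwise_cons.mpr ⟨?_, List.pairwise_cons.mpr h1⟩
      intro z hz
      rcases List.mem_cons.mp hz with rfl | hz
      · exact Or.inl hb
      · rcases h1.1 z hz with h | h
        · exact Or.inl (lt_trans hb h)
        · exact Or.inl (lt_of_lt_of_eq hb h.1)
    · simp only [PySem.List.insertBy, hb, decide_false]
      refine List.pairwise_cons.mpr ⟨?_, ih h1.2 (fun z hz => h2 z (by simp [hz]))⟩
      intro z hz
      rcases (PySem.List.mem_insertBy _ _ _ _).mp hz with rfl | hz
      · rcases lt_or_eq_of_le (not_lt.mp hb) with h | h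
        · exact Or.inl h
        · exact Or.inr ⟨h, hyx⟩
      · exact h1.1 z hz

lemma foldl_insertBy_pairwise (key : Nat → Int) :
    ∀ (xs acc : List Nat), acc.Pairwise (Rlex key) →
      (∀ y ∈ acc, ∀ x ∈ xs, y < x) → xs.Pairwise (· < ·) →
      (xs.foldl (fun acc x => PySem.List.insertBy (fun a b => decide (key a < key b)) x acc) acc).Pairwise (Rlex key) := by
  intro xs
  induction xs with
  | nil => intro acc h1 _ _; simpa using h1
  | cons x xs ih =>
    intro acc h1 h2 h3
    rw [List.pairwise_cons] at h3
    simp only [List.foldl_cons]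
    apply ih
    · exact insertBy_pairwise key x acc h1 (fun y hy => h2 y hy x (by simp))
    · intro y hy x' hx'
      rcases (PySem.List.mem_insertBy _ _ _ _).mp hy with rfl | hy
      · exact h3.1 x' hx'
      · exact h2 y hy x' (by simp [hx'])
    · exact h3.2

lemma sigma_pairwise (A : List Int) : (sigma A).Pairwise (Rlex (fun i => A.getD i 0)) := by
  unfold sigma
  rw [PySem.List.sorted_eq_foldl_insertBy]
  exact foldl_insertBy_pairwise _ (List.range A.length) [] (by simp) (by simp)
    (List.pairwise_lt_range)

lemma sigma_perm (A : List Int) : (sigma A).Perm (List.range A.length) :=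
  PySem.List.sorted_perm _ _ _

lemma sigma_nodup (A : List Int) : (sigma A).Nodup :=
  (sigma_perm A).nodup_iff.mpr (List.nodup_range)

lemma sigma_length (A : List Int) : (sigma A).length = A.length := by
  simpa using (sigma_perm A).length_eq

lemma mem_sigma (A : List Int) (p : Nat) : p ∈ sigma A ↔ p < A.length := by
  rw [(sigma_perm A).mem_iff, List.mem_range]

-- sorted(A) reads the values off the argsort
lemma sortedA_eq_map (A : List Int) :
    PySem.List.sorted A (fun x => x) false = (sigma A).map (fun i => A.getD i 0) := by
  have h1 : ((sigma A).map (fun i => A.getD i 0)).Perm A := by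
    have h := (sigma_perm A).map (fun i => A.getD i 0)
    rwa [range_map_getD] at h
  refine PySem.List.eq_of_perm_of_pairwise_le_of_injective (fun x : Int => x)
    (fun a b h => h) ((PySem.List.sorted_perm A _ false).trans h1.symm) ?_ ?_
  · exact PySem.List.sorted_pairwise A _
  · exact PySem.List.sorted_map_key_pairwise (List.range A.length) (fun i => A.getD i 0)

-- index? returns j when l[j] is the first occurrence of v
lemma index?_first {α : Type} [BEq α] [LawfulBEq α] {l : List α} {v : α} {j : Nat}
    (hj : j < l.length) (h1 : l[j] = v) (h2 : ∀ m (hm : m < j), l[m] ≠ v) :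
    PySem.List.index? l v = some j := by
  rw [PySem.List.index?_eq_some_iff]
  refine ⟨l.take j, l.drop (j + 1), ?_, by simp [Nat.le_of_lt hj], ?_⟩
  · conv_lhs => rw [← List.take_append_drop j l]
    rw [← List.getElem_cons_drop hj, h1]
  · intro hmem
    obtain ⟨m, hm, hmeq⟩ := List.getElem_of_mem hmem
    have hmj : m < j := by simpa [Nat.le_of_lt hj] using hm
    rw [List.getElem_take] at hmeq
    exact h2 m hmj hmeq

-- index? finds an element of a nodup list at its own index
lemma index?_getElem_nodup {l : List Nat} (h : l.Nodup) {i : Nat} (hi : i < l.length) :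
    PySem.List.index? l l[i] = some i := by
  apply index?_first hi rfl
  intro m hm heq
  have : m = i := (List.Nodup.getElem_inj_iff h).mp heq
  omega

-- grade[i] is the canonical label
lemma gradeAList_getD (n i : Nat) (hi : i < n) :
    (gradeAList n).getD i "" = medalOrNum (i : Int) := by
  unfold gradeAList medalOrNum
  by_cases h3 : i < 3
  · interval_cases i <;> split_ifs <;> simp_all
  · have hn : ((n : Int)) > 3 := by omega
    rw [if_pos hn, PySem.List.pyRange_one, List.map_map]
    have hlen : i - 3 < (((n : Int)) + 1 - 4).toNat := by omega
    rw [List.getD_append_right _ _ _ _ (by simp; omega)]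
    simp only [List.length_cons, List.length_nil]
    rw [PySem.List.getD_map_range _ _ _ _ hlen]
    rw [if_neg (by omega)]
    simp only [Function.comp]
    congr 1
    push_cast [Nat.le_of_not_lt h3]
    omega

-- the state of A's list C after k iterations
def aState (A : List Int) (k : Nat) : List Cell :=
  (List.range A.length).map (fun p =>
    match PySem.List.index? (sigma A) p with
    | some i => if i < k then Cell.str (medalOrNum (i : Int)) else Cell.int (A.getD p 0)
    | none => Cell.int (A.getD p 0))

-- the state of B's list out after k iterations
def bState (A : List Int) (k : Nat) : List (Option String) :=
  (List.range A.length).map (fun p =>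
    match PySem.List.index? (sigma A) p with
    | some i => if i < k then some (medalOrNum (i : Int)) else none
    | none => none)

lemma aState_length (A : List Int) (k : Nat) : (aState A k).length = A.length := by
  simp [aState]

lemma aState_getElem (A : List Int) (k p : Nat) (hp : p < (aState A k).length) :
    (aState A k)[p] =
      match PySem.List.index? (sigma A) p with
      | some i => if i < k then Cell.str (medalOrNum (i : Int)) else Cell.int (A.getD p 0)
      | none => Cell.int (A.getD p 0) := by
  simp [aState]

lemma bState_length (A : List Int) (k : Nat) : (bState A k).length = A.length := by
  simp [bState]

lemma bState_getElem (A : List Int) (k p : Nat) (hp : p < (bState A k).length) :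
    (bState A k)[p] =
      match PySem.List.index? (sigma A) p with
      | some i => if i < k then some (medalOrNum (i : Int)) else none
      | none => none := by
  simp [bState]

-- every position below A.length has an index in sigma, and that index is below A.length
lemma sigma_index_exists (A : List Int) (p : Nat) (hp : p < A.length) :
    ∃ i, PySem.List.index? (sigma A) p = some i ∧ i < A.length ∧
      ∃ hi : i < (sigma A).length, (sigma A)[i] = p := by
  have hmem : p ∈ sigma A := (mem_sigma A p).mpr hp
  obtain ⟨i, hi⟩ := Option.isSome_iff_exists.mp ((PySem.List.index?_isSome_iff _ _).mpr hmem)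
  obtain ⟨hlt, heq, -⟩ := PySem.List.getElem_of_index?_eq_some hi
  exact ⟨i, hi, by rw [← sigma_length A]; exact hlt, hlt, heq⟩

lemma aState_zero (A : List Int) : aState A 0 = A.map Cell.int := by
  apply List.ext_getElem
  · simp [aState_length]
  · intro p h1 h2
    rw [aState_getElem A 0 p h1, List.getElem_map]
    have hp : p < A.length := by simpa [aState_length] using h1
    cases h : PySem.List.index? (sigma A) p <;>
      simp [List.getD_eq_getElem?_getD, List.getElem?_eq_getElem hp]

lemma aStep_aState (A : List Int) (k : Nat) (hk : k < A.length) :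
    aStep (gradeAList A.length) (PySem.List.sorted A (fun x => x) false) (aState A k) k
      = aState A (k + 1) := by
  have hkσ : k < (sigma A).length := by rw [sigma_length]; omega
  have hσk_lt : (sigma A)[k] < A.length := (mem_sigma A _).mp (List.getElem_mem hkσ)
  -- B[k] is the value at the k-th argsort position
  have ha : (PySem.List.sorted A (fun x => x) false).getD k 0 = A.getD ((sigma A)[k]) 0 := by
    rw [sortedA_eq_map, List.getD_eq_getElem?_getD,
      List.getElem?_eq_getElem (by simpa using hkσ), List.getElem_map, Option.getD_some]
  -- C.index finds exactly position (sigma A)[k]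
  have hb : PySem.List.index? (aState A k) (Cell.int (A.getD ((sigma A)[k]) 0))
      = some ((sigma A)[k]) := by
    apply index?_first (by rw [aState_length]; exact hσk_lt)
    · rw [aState_getElem A k _ (by rw [aState_length]; exact hσk_lt),
        index?_getElem_nodup (sigma_nodup A) hkσ]
      simp
    · intro m hm hmeq
      have hmA : m < A.length := by omega
      rw [aState_getElem A k m (by rw [aState_length]; exact hmA)] at hmeq
      obtain ⟨i, hidx, hiA, hiσ, hieq⟩ := sigma_index_exists A m hmA
      rw [hidx] at hmeq
      by_cases hik : i < k
      · simp [hik] at hmeq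
      · simp only [hik, if_false] at hmeq
        have hmkey : A.getD m 0 = A.getD ((sigma A)[k]) 0 := by
          simpa using hmeq
        have hne : i ≠ k := by
          intro h; subst h; rw [hieq] at *; omega
        have hki : k < i := by omega
        have hR := (List.pairwise_iff_getElem.mp (sigma_pairwise A)) k i hkσ hiσ hki
        rw [hieq] at hR
        rcases hR with h | h
        · simp only at h; omega
        · omega
  unfold aStep
  rw [ha, hb, gradeAList_getD A.length k hk]
  -- the updated list is the (k+1)-state
  apply List.ext_getElem
  · simp [aState_length]
  · intro p h1 h2
    have hpA : p < A.length := by simpa [aState_length] using h2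
    rw [List.getElem_set, aState_getElem A (k+1) p h2]
    by_cases hps : (sigma A)[k] = p
    · subst hps
      rw [if_pos rfl, index?_getElem_nodup (sigma_nodup A) hkσ]
      simp
    · rw [if_neg hps, aState_getElem A k p (by rw [aState_length]; exact hpA)]
      obtain ⟨i, hidx, hiA, hiσ, hieq⟩ := sigma_index_exists A p hpA
      have hik : i ≠ k := by
        intro h; subst h; exact hps hieq
      simp only [hidx]
      by_cases hlt : i < k
      · rw [if_pos hlt, if_pos (by omega)]
      · rw [if_neg hlt, if_neg (by omega)]

lemma bStep_bState (A : List Int) (k : Nat) (hk : k < A.length) :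
    bStep (bState A k) ((k : Int), (sigma A).getD k 0) = bState A (k + 1) := by
  have hkσ : k < (sigma A).length := by rw [sigma_length]; omega
  have hgd : (sigma A).getD k 0 = (sigma A)[k] := by
    rw [List.getD_eq_getElem?_getD, List.getElem?_eq_getElem hkσ, Option.getD_some]
  have hσk_lt : (sigma A)[k] < A.length := (mem_sigma A _).mp (List.getElem_mem hkσ)
  unfold bStep
  simp only [hgd]
  apply List.ext_getElem
  · simp [bState_length]
  · intro p h1 h2
    have hpA : p < A.length := by simpa [bState_length] using h2
    rw [List.getElem_set, bState_getElem A (k+1) p h2]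
    by_cases hps : (sigma A)[k] = p
    · subst hps
      rw [if_pos rfl, index?_getElem_nodup (sigma_nodup A) hkσ]
      simp
    · rw [if_neg hps, bState_getElem A k p (by rw [bState_length]; exact hpA)]
      obtain ⟨i, hidx, hiA, hiσ, hieq⟩ := sigma_index_exists A p hpA
      have hik : i ≠ k := by
        intro h; subst h; exact hps hieq
      simp only [hidx]
      by_cases hlt : i < k
      · rw [if_pos hlt, if_pos (by omega)]
      · rw [if_neg hlt, if_neg (by omega)]

lemma aLoop (A : List Int) (k : Nat) (hk : k ≤ A.length) :
    (List.range k).foldl (aStep (gradeAList A.length) (PySem.List.sorted A (fun x => x) false))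
      (A.map Cell.int) = aState A k := by
  induction k with
  | zero => simp [aState_zero]
  | succ k ih =>
    rw [List.range_succ, List.foldl_append, ih (by omega)]
    simpa using aStep_aState A k (by omega)

lemma bState_zero (A : List Int) : bState A 0 = List.replicate A.length none := by
  apply List.ext_getElem
  · simp [bState_length]
  · intro p h1 h2
    rw [bState_getElem A 0 p h1]
    cases h : PySem.List.index? (sigma A) p <;> simp

lemma bLoop (A : List Int) :
    (PySem.List.enumerate (sigma A)).foldl bStep (List.replicate A.length none) = bState A A.length := by
  rw [PySem.List.enumerate_eq_map_pyRange (sigma A) 0, List.foldl_map]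
  rw [show PySem.List.len (sigma A) = ((A.length : Nat) : Int) by simp [sigma_length]]
  rw [PySem.List.pyRange_zero_nat, List.foldl_map]
  have aux : ∀ k, k ≤ A.length →
      (List.range k).foldl (fun acc (j : Nat) => bStep acc ((j : Int), PySem.List.pyGetD (sigma A) (j : Int) 0))
        (List.replicate A.length none) = bState A k := by
    intro k
    induction k with
    | zero => intro _; simp [bState_zero]
    | succ k ih =>
      intro hk
      rw [List.range_succ, List.foldl_append, ih (by omega), List.foldl_cons, List.foldl_nil]
      rw [show PySem.List.pyGetD (sigma A) (k : Int) 0 = (sigma A).getD k 0 from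
        PySem.List.pyGetD_natCast ..]
      exact bStep_bState A k (by omega)
  exact aux A.length le_rfl

lemma final_eq (A : List Int) :
    (aState A A.length).map (fun c => match c with | Cell.int z => PySem.Int.toStr z | Cell.str s => s)
      = (bState A A.length).map (fun o => o.getD "") := by
  apply List.ext_getElem
  · simp [aState_length, bState_length]
  · intro p h1 h2
    have hpA : p < A.length := by simpa [aState_length] using h1
    rw [List.getElem_map, List.getElem_map,
      aState_getElem A _ p (by rw [aState_length]; exact hpA),
      bState_getElem A _ p (by rw [bState_length]; exact hpA)]
    obtain ⟨i, hidx, hiA, -⟩ := sigma_index_exists A p hpA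
    rw [PySem.List.index?_eq_idxOf?] at hidx
    simp [hidx, hiA]

-- ===== VERDICT (by name: the statement is the Claim_ definition above) =====
theorem gradeMeadl_spec : Claim_equal_gradeMeadl := by
  intro A _
  show gradeMeadl A = gradeMeadl_alt A
  unfold gradeMeadl gradeMeadl_alt
  have hb := bLoop A
  unfold sigma at hb
  dsimp only
  rw [PySem.List.length_sorted, aLoop A A.length le_rfl, hb, final_eq A]
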